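-- pv_equiv track=rewrite | github.com/pennepalli/MyLeetCode | find_327.py | generate_exprs
-- ===== SOURCE A (Python) =====
-- import operator
--
-- ops = {
--     '+': operator.add,
--     '-': operator.sub,
--     '*': operator.mul,
--     '/': operator.truediv
-- }
--
-- def generate_exprs(nums):
--     if len(nums) == 1:
--         yield str(nums[0])
--     else:
--         for i in range(1, len(nums)):
--             left = nums[:i]
--             right = nums[i:]
--             for l in generate_exprs(left):
--                 for r in generate_exprs(right):
--                     for op in ops:
--                         expr = f'({l}{op}{r})'
--                         yield expr
-- ===== SOURCE B (Python) =====
-- def generate_exprs(nums):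
--     n = len(nums)
--     table = {}
--     for k in range(n):
--         table[(k, k + 1)] = [str(nums[k])]
--     for span in range(2, n + 1):
--         for i in range(n - span + 1):
--             j = i + span
--             cell = []
--             for m in range(i + 1, j):
--                 for l in table[(i, m)]:
--                     for r in table[(m, j)]:
--                         for op in ('+', '-', '*', '/'):
--                             cell.append(f'({l}{op}{r})')
--             table[(i, j)] = cell
--     if n:
--         yield from table[(0, n)]
-- ===== Notes on version B (the rewrite author's own statement) =====
-- stated objective: alternative
-- what changed: Replaces A's top-down recursive generator (which recomputes every subrange's expression list once per enclosing split) with a bottom-up interval-DP table keyed by subrange (i, j), combining each subrange exactly once; the emitted sequence is identical.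
import Mathlib
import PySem

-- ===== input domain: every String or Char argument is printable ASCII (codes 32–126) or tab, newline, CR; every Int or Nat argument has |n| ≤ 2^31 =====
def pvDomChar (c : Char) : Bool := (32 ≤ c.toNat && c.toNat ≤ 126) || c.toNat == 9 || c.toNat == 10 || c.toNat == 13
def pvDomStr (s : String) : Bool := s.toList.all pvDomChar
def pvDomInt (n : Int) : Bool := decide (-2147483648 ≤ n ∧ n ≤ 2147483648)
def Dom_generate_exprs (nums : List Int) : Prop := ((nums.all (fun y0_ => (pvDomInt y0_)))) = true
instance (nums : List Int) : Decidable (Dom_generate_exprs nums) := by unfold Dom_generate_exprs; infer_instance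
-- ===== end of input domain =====

-- B re-implements A's recursive generator as a bottom-up interval-DP table keyed by subrange (i, j);
-- same yielded sequence, each subrange's expression list computed once instead of once per enclosing split.

-- ===== PORT A =====
-- keys of the module-level dict `ops`, in insertion order (A iterates `for op in ops`)
def opsKeys : List String := ["+", "-", "*", "/"]

def generate_exprs (nums : List Int) : List String :=
  if nums.length = 1 then
    [PySem.Int.toStr ((PySem.List.pyGet? nums 0).getD 0)]
  else
    (PySem.List.pyRange 1 (nums.length : Int)).attach.flatMap (fun i =>
      (generate_exprs (PySem.List.slice nums none (some i.1))).flatMap (fun l =>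
        (generate_exprs (PySem.List.slice nums (some i.1) none)).flatMap (fun r =>
          opsKeys.map (fun op => "(" ++ l ++ op ++ r ++ ")"))))
  termination_by nums.length
  decreasing_by
  · rcases (PySem.List.mem_pyRange_one.mp i.2) with ⟨h1, h2⟩
    rw [PySem.List.slice_from nums (by omega)]
    simp only [List.length_drop]
    omega
  · rcases (PySem.List.mem_pyRange_one.mp i.2) with ⟨h1, h2⟩
    rw [PySem.List.slice_to nums (by omega)]
    simp only [List.length_take]
    omega

-- ===== PORT B =====
-- the tuple ('+', '-', '*', '/') B iterates over
def altOps : List String := ["+", "-", "*", "/"]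

-- the `cell` inner loops: for m in range(i+1, j): for l in table[(i,m)]: for r in table[(m,j)]: for op in …: cell.append(…)
def altCell (t : PySem.Dict (Int × Int) (List String)) (i j : Int) : List String :=
  (PySem.List.pyRange (i + 1) j).foldl
    (fun cell m =>
      cell ++ (t.getD (i, m) []).flatMap (fun l =>
        (t.getD (m, j) []).flatMap (fun r =>
          altOps.map (fun op => "(" ++ l ++ op ++ r ++ ")"))))
    []

-- for k in range(n): table[(k, k+1)] = [str(nums[k])]
def altBase (nums : List Int) : PySem.Dict (Int × Int) (List String) :=
  (PySem.List.pyRange 0 (nums.length : Int)).foldl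
    (fun t k => t.insert (k, k + 1) [PySem.Int.toStr ((PySem.List.pyGet? nums k).getD 0)])
    PySem.Dict.empty

-- one span iteration: for i in range(n - span + 1): table[(i, i+span)] = cell
def altSpanStep (n : Int) (t : PySem.Dict (Int × Int) (List String)) (span : Int) :
    PySem.Dict (Int × Int) (List String) :=
  (PySem.List.pyRange 0 (n - span + 1)).foldl
    (fun t i => t.insert (i, i + span) (altCell t i (i + span))) t

def generate_exprs_alt (nums : List Int) : List String :=
  let n : Int := nums.length
  let table := (PySem.List.pyRange 2 (n + 1)).foldl (altSpanStep n) (altBase nums)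
  if n ≠ 0 then table.getD (0, n) [] else []

-- ===== PRECONDITION & SPEC =====
def Spec_generate_exprs (nums : List Int) (out : List String) : Prop := out = generate_exprs_alt nums
instance (nums : List Int) (out : List String) : Decidable (Spec_generate_exprs nums out) := by unfold Spec_generate_exprs; infer_instance

-- ===== CLAIM (what is proved, stated in full; the proofs are below) =====
def Claim_equal_generate_exprs : Prop := ∀ (nums : List Int), Dom_generate_exprs nums → Spec_generate_exprs nums (generate_exprs nums)

-- ===== LEMMAS AND PROOFS =====

-- nums[i:j] for Nat bounds
def pvSub (nums : List Int) (i j : Nat) : List Int := (nums.drop i).take (j - i)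

-- table invariant: every subrange of span ≤ s stores A's expression list for that subrange
def pvInv (nums : List Int) (t : PySem.Dict (Int × Int) (List String)) (s : Nat) : Prop :=
  ∀ i j : Nat, i < j → j ≤ nums.length → j - i ≤ s →
    t.get? ((i : Int), (j : Int)) = some (generate_exprs (pvSub nums i j))

theorem pvSub_length (nums : List Int) (i j : Nat) (h : j ≤ nums.length) :
    (pvSub nums i j).length = j - i := by
  simp [pvSub]; omega

theorem pvSub_take (nums : List Int) (i j d : Nat) (h : d ≤ j - i) :
    (pvSub nums i j).take d = pvSub nums i (i + d) := by
  unfold pvSub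
  rw [List.take_take]
  congr 1
  omega

theorem pvSub_drop (nums : List Int) (i j d : Nat) :
    (pvSub nums i j).drop d = pvSub nums (i + d) j := by
  simp [pvSub, List.drop_take, List.drop_drop]
  congr 1
  omega

theorem genA_singleton (a : Int) : generate_exprs [a] = [PySem.Int.toStr a] := by
  rw [generate_exprs]
  simp [PySem.List.pyGet?, PySem.List.pyIdx?]

theorem genA_unfold (xs : List Int) (h : 2 ≤ xs.length) :
    generate_exprs xs = (List.range (xs.length - 1)).flatMap (fun k =>
      (generate_exprs (xs.take (k + 1))).flatMap (fun l =>
        (generate_exprs (xs.drop (k + 1))).flatMap (fun r =>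
          opsKeys.map (fun op => "(" ++ l ++ op ++ r ++ ")")))) := by
  rw [generate_exprs]
  rw [if_neg (by omega)]
  simp only [List.flatMap_subtype, List.unattach_attach]
  rw [PySem.List.pyRange_one]
  rw [List.flatMap_map]
  have hn : ((xs.length : Int) - 1).toNat = xs.length - 1 := by omega
  rw [hn]
  apply List.flatMap_congr
  intro k hk
  rw [PySem.List.slice_to xs (by omega), PySem.List.slice_from xs (by omega)]
  have h1 : ((1 : Int) + (k : Int)).toNat = k + 1 := by omega
  rw [h1]

theorem pvBase_aux (nums : List Int) (m : Nat) :
    ∀ k : Nat, k < m →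
      ((PySem.List.pyRange 0 (m : Int)).foldl
        (fun t k => t.insert (k, k + 1) [PySem.Int.toStr ((PySem.List.pyGet? nums k).getD 0)])
        PySem.Dict.empty).get? ((k : Int), (k : Int) + 1)
        = some [PySem.Int.toStr ((PySem.List.pyGet? nums (k : Int)).getD 0)] := by
  induction m with
  | zero => intro k hk; omega
  | succ m ih =>
    intro k hk
    rw [show ((m + 1 : Nat) : Int) = (m : Int) + 1 by push_cast; ring]
    rw [PySem.List.pyRange_one_succ_right (by positivity)]
    rw [List.foldl_append]
    simp only [List.foldl_cons, List.foldl_nil]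
    rw [PySem.Dict.get?_insert]
    by_cases hkm : k = m
    · subst hkm
      rw [if_pos rfl]
    · rw [if_neg (by simp; omega)]
      exact ih k (by omega)

theorem pvInv_base (nums : List Int) : pvInv nums (altBase nums) 1 := by
  intro i j hij hjn hspan
  have hj : j = i + 1 := by omega
  subst hj
  have hi : i < nums.length := by omega
  unfold altBase
  push_cast
  rw [pvBase_aux nums nums.length i hi]
  have hsub : pvSub nums i (i + 1) = [nums[i]] := by
    have hd : List.drop i nums = nums[i] :: List.drop (i + 1) nums :=
      List.drop_eq_getElem_cons hi
    unfold pvSub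
    rw [show i + 1 - i = 1 by omega, hd, List.take_succ_cons, List.take_zero]
  rw [hsub, genA_singleton]
  rw [PySem.List.pyGet?_natCast]
  simp [hi]

theorem pvCell_correct (nums : List Int) (t : PySem.Dict (Int × Int) (List String))
    (s : Nat) (hs : 2 ≤ s) (i : Nat) (hij : i + s ≤ nums.length)
    (hInv : pvInv nums t (s - 1)) :
    altCell t (i : Int) ((i : Int) + (s : Int)) = generate_exprs (pvSub nums i (i + s)) := by
  have hlen : (pvSub nums i (i + s)).length = s := by
    rw [pvSub_length nums i (i + s) hij]; omega
  rw [genA_unfold _ (by rw [hlen]; omega)]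
  rw [hlen]
  unfold altCell
  rw [PySem.List.pyRange_one]
  rw [show (((i : Int) + (s : Int)) - ((i : Int) + 1)).toNat = s - 1 from by omega]
  rw [List.foldl_map]
  have hbody' : ∀ (k : Nat), k ∈ List.range (s - 1) → ∀ (cell : List String),
      (cell ++ (t.getD ((i : Int), (i : Int) + 1 + (k : Int)) []).flatMap (fun l =>
        (t.getD ((i : Int) + 1 + (k : Int), (i : Int) + (s : Int)) []).flatMap (fun r =>
          altOps.map (fun op => "(" ++ l ++ op ++ r ++ ")"))))
      = cell ++ (generate_exprs (pvSub nums i (i + k + 1))).flatMap (fun l =>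
        (generate_exprs (pvSub nums (i + k + 1) (i + s))).flatMap (fun r =>
          opsKeys.map (fun op => "(" ++ l ++ op ++ r ++ ")"))) := by
    intro k hk cell
    have hk' : k < s - 1 := List.mem_range.mp hk
    rw [show (i : Int) + 1 + (k : Int) = ((i + k + 1 : Nat) : Int) from by push_cast; ring]
    rw [show (i : Int) + (s : Int) = ((i + s : Nat) : Int) from by push_cast; ring]
    rw [PySem.Dict.getD_eq_get?_getD, PySem.Dict.getD_eq_get?_getD]
    rw [hInv i (i + k + 1) (by omega) (by omega) (by omega)]
    rw [hInv (i + k + 1) (i + s) (by omega) (by omega) (by omega)]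
    simp [altOps, opsKeys]
  refine Eq.trans (PySem.List.foldl_congr_mem' _ _ _ _ hbody') ?_
  rw [PySem.List.foldl_append_eq_flatMap, List.nil_append]
  apply List.flatMap_congr
  intro k hk
  have hk' : k < s - 1 := List.mem_range.mp hk
  rw [pvSub_take nums i (i + s) (k + 1) (by omega), pvSub_drop nums i (i + s) (k + 1)]
  rw [show i + (k + 1) = i + k + 1 from by omega]

theorem pvILoop (nums : List Int) (t : PySem.Dict (Int × Int) (List String))
    (s : Nat) (hs : 2 ≤ s) (hsn : s ≤ nums.length) (hInv : pvInv nums t (s - 1)) :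
    ∀ p : Nat, p ≤ nums.length - s + 1 →
      (∀ i j : Nat, i < j → j ≤ nums.length → j - i < s →
        ((PySem.List.pyRange 0 (p : Int)).foldl
          (fun t i => t.insert (i, i + (s : Int)) (altCell t i (i + (s : Int)))) t).get?
            ((i : Int), (j : Int)) = t.get? ((i : Int), (j : Int))) ∧
      (∀ i : Nat, i < p →
        ((PySem.List.pyRange 0 (p : Int)).foldl
          (fun t i => t.insert (i, i + (s : Int)) (altCell t i (i + (s : Int)))) t).get?
            ((i : Int), (i : Int) + (s : Int))
          = some (generate_exprs (pvSub nums i (i + s)))) := by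
  intro p
  induction p with
  | zero =>
    intro _
    rw [show ((0 : Nat) : Int) = 0 from rfl, PySem.List.pyRange_one_eq_nil le_rfl]
    exact ⟨fun _ _ _ _ _ => rfl, fun i hi => absurd hi (by omega)⟩
  | succ p ih =>
    intro hp
    obtain ⟨ih1, ih2⟩ := ih (by omega)
    rw [show ((p + 1 : Nat) : Int) = (p : Int) + 1 from by push_cast; ring]
    rw [PySem.List.pyRange_one_succ_right (by positivity)]
    rw [List.foldl_append]
    simp only [List.foldl_cons, List.foldl_nil]
    have hInv' : pvInv nums
        ((PySem.List.pyRange 0 (p : Int)).foldl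
          (fun t i => t.insert (i, i + (s : Int)) (altCell t i (i + (s : Int)))) t) (s - 1) := by
      intro i' j' h1 h2 h3
      rw [ih1 i' j' h1 h2 (by omega)]
      exact hInv i' j' h1 h2 h3
    constructor
    · intro i j hij hjn hspan
      rw [PySem.Dict.get?_insert]
      rw [if_neg (by
        intro hkey
        have hki : (i : Int) = (p : Int) := congrArg Prod.fst hkey
        have hkj : (j : Int) = (p : Int) + (s : Int) := congrArg Prod.snd hkey
        omega)]
      exact ih1 i j hij hjn hspan
    · intro i hi
      rw [PySem.Dict.get?_insert]
      by_cases hip : i = p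
      · subst hip
        rw [if_pos rfl]
        rw [pvCell_correct nums _ s hs i (by omega) hInv']
      · rw [if_neg (by
          intro hkey
          have hki : (i : Int) = (p : Int) := congrArg Prod.fst hkey
          omega)]
        exact ih2 i (by omega)

theorem pvSpanStep (nums : List Int) (t : PySem.Dict (Int × Int) (List String))
    (s : Nat) (hs : 2 ≤ s) (hsn : s ≤ nums.length) (hInv : pvInv nums t (s - 1)) :
    pvInv nums (altSpanStep (nums.length : Int) t (s : Int)) s := by
  have hloop := pvILoop nums t s hs hsn hInv (nums.length - s + 1) le_rfl
  unfold altSpanStep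
  rw [show (nums.length : Int) - (s : Int) + 1 = ((nums.length - s + 1 : Nat) : Int) from by omega]
  obtain ⟨h1, h2⟩ := hloop
  intro i j hij hjn hspan
  by_cases hcase : j - i = s
  · have hj : j = i + s := by omega
    subst hj
    rw [show ((i + s : Nat) : Int) = (i : Int) + (s : Int) from by push_cast; ring]
    exact h2 i (by omega)
  · rw [h1 i j hij hjn (by omega)]
    exact hInv i j hij hjn (by omega)

theorem pvSpanLoop (nums : List Int) (s : Nat) (h1 : 1 ≤ s) (h2 : s ≤ nums.length) :
    pvInv nums ((PySem.List.pyRange 2 ((s : Int) + 1)).foldl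
      (altSpanStep (nums.length : Int)) (altBase nums)) s := by
  induction s with
  | zero => omega
  | succ s ih =>
    by_cases hs0 : s = 0
    · subst hs0
      rw [show (((1 : Nat)) : Int) + 1 = (2 : Int) from by norm_num]
      rw [PySem.List.pyRange_one_eq_nil le_rfl]
      exact pvInv_base nums
    · rw [show ((s + 1 : Nat) : Int) + 1 = ((s : Int) + 1) + 1 from by push_cast; ring]
      rw [PySem.List.pyRange_one_succ_right (by omega)]
      rw [List.foldl_append]
      simp only [List.foldl_cons, List.foldl_nil]
      have hint := pvSpanStep nums
        ((PySem.List.pyRange 2 ((s : Int) + 1)).foldl (altSpanStep (nums.length : Int)) (altBase nums))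
        (s + 1) (by omega) h2 (by simpa using ih (by omega) (by omega))
      rw [show ((s + 1 : Nat) : Int) = (s : Int) + 1 from by push_cast; ring] at hint
      exact hint

-- ===== VERDICT (by name: the statement is the Claim_ definition above) =====
theorem generate_exprs_spec : Claim_equal_generate_exprs := by
  intro nums _
  unfold Spec_generate_exprs generate_exprs_alt
  by_cases h0 : nums.length = 0
  · have hnil : nums = [] := List.eq_nil_of_length_eq_zero h0
    subst hnil
    rw [generate_exprs]
    norm_num
  · have h1 : 1 ≤ nums.length := by omega
    have hget := pvSpanLoop nums nums.length h1 le_rfl 0 nums.length (by omega) le_rfl (by omega)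
    rw [if_pos (by exact_mod_cast h0)]
    rw [PySem.Dict.getD_eq_get?_getD]
    rw [show ((0 : Int), (nums.length : Int)) = (((0 : Nat) : Int), (nums.length : Int)) from rfl]
    rw [hget]
    have hsub : pvSub nums 0 nums.length = nums := by
      unfold pvSub
      simp
    rw [hsub]
    rfl
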